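-- pv_equiv track=rewrite | github.com/SelinaYan0514/CS111--Intro_to_Computer_Science_I | PS_04/ps4pr3.py | num_odds_rec
-- ===== SOURCE A (Python) =====
-- def num_odds_rec(binvals):
--     """ return the number of bitstrings in the list that represent an odd number
--         input binvals:  a list of 0 or more strings
--     """
--     if len(binvals) == 0:
--         return 0
--     else:
--         rest_num_odds_rec = num_odds_rec(binvals[1:])
--         if binvals[0][-1] == '0':
--             return rest_num_odds_rec + 0
--         else:
--             return rest_num_odds_rec + 1
-- ===== SOURCE B (Python) =====
-- def num_odds_rec(binvals):
--     """ return the number of bitstrings in the list that represent an odd number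
--         input binvals:  a list of 0 or more strings
--     """
--     return sum(1 for s in binvals if s[-1] != '0')
-- ===== Notes on version B (the rewrite author's own statement) =====
-- stated objective: faster
-- what changed: Replaced the recursion that copies the tail with binvals[1:] at every step by a single linear generator pass counting strings whose last character is not '0'.
import Mathlib
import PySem

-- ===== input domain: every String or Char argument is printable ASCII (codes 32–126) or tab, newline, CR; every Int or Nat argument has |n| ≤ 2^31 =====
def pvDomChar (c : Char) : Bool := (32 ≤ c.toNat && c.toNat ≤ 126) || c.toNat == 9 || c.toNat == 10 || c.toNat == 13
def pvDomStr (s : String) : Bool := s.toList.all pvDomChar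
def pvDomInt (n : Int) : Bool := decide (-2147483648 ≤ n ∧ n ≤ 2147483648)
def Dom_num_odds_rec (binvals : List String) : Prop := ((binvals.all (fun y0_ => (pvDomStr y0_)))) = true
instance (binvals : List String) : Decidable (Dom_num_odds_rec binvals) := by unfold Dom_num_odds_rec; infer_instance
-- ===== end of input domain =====

-- B replaces A's tail-copying recursion with one linear counting pass (faster).
-- Pre_ excludes lists containing an empty string, on which both Pythons raise IndexError.


-- ===== PORT A =====
-- recursion on the list; binvals[0][-1] → PySem.Str.pyGet? s (-1)
def num_odds_rec (binvals : List String) : Int :=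
  match binvals with
  | [] => 0
  | s :: rest =>
    let rest_num_odds_rec := num_odds_rec rest
    if PySem.Str.pyGet? s (-1) = some '0' then rest_num_odds_rec + 0
    else rest_num_odds_rec + 1

-- ===== PORT B =====
-- sum(1 for s in binvals if s[-1] != '0') as a left fold
def num_odds_rec_alt (binvals : List String) : Int :=
  binvals.foldl (fun acc s => if PySem.Str.pyGet? s (-1) ≠ some '0' then acc + 1 else acc) 0

-- ===== PRECONDITION & SPEC =====
-- Pre_ excludes lists containing an empty string: there A (and B) raise IndexError on s[-1].
def Pre_num_odds_rec (binvals : List String) : Prop := ∀ s ∈ binvals, s ≠ ""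
instance (binvals : List String) : Decidable (Pre_num_odds_rec binvals) := by unfold Pre_num_odds_rec; infer_instance
def pvWitness_num_odds_rec : List String := ["10", "11", "0"]

def Spec_num_odds_rec (binvals : List String) (out : Int) : Prop := out = num_odds_rec_alt binvals
instance (binvals : List String) (out : Int) : Decidable (Spec_num_odds_rec binvals out) := by unfold Spec_num_odds_rec; infer_instance

-- ===== CLAIM (what is proved, stated in full; the proofs are below) =====
def Claim_equal_num_odds_rec : Prop := ∀ (binvals : List String), Dom_num_odds_rec binvals → Pre_num_odds_rec binvals → Spec_num_odds_rec binvals (num_odds_rec binvals)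

-- ===== LEMMAS AND PROOFS =====
theorem num_odds_rec_alt_acc (binvals : List String) (acc : Int) :
    binvals.foldl (fun acc s => if PySem.Str.pyGet? s (-1) ≠ some '0' then acc + 1 else acc) acc
      = acc + num_odds_rec binvals := by
  induction binvals generalizing acc with
  | nil => simp [num_odds_rec]
  | cons s rest ih =>
    simp only [List.foldl, num_odds_rec]
    rw [ih]
    split_ifs <;> try ring
    all_goals tauto

-- ===== VERDICT (by name: the statement is the Claim_ definition above) =====
theorem num_odds_rec_spec : Claim_equal_num_odds_rec := by
  intro binvals _ _
  unfold Spec_num_odds_rec num_odds_rec_alt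
  rw [num_odds_rec_alt_acc]
  ring
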